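-- pv_equiv track=rewrite | github.com/mudkippzs/fatebot | epiccalc.py | calculate_epic_as_dict
-- ===== SOURCE A (Python) =====
-- def calculate_epic_as_dict(dot):
-- 	if dot == 0:
-- 		return 0
-- 	number_line = [_ for _ in range(0, dot + 1)]
-- 	auto_successes = 0
-- 	success_list = {}
-- 	epic_attr = 0
-- 	for n in number_line:
-- 		if len(success_list) > 1:
-- 			epic_attr = (n-1) + success_list[str(n-1)]
-- 			success_list[str(n)] = epic_attr
-- 		else:
-- 			success_list[str(n)] = 1
--
-- 	return success_list
-- ===== SOURCE B (Python) =====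
-- def calculate_epic_as_dict(dot):
-- 	if dot == 0:
-- 		return 0
-- 	return {str(n): 1 + n * (n - 1) // 2 for n in range(dot + 1)}
-- ===== Notes on version B (the rewrite author's own statement) =====
-- stated objective: simpler
-- what changed: Replaces the stateful loop (running accumulator epic_attr plus len()-based branching over a mutated dict) with a single dict comprehension whose values come from a closed-form triangular-number formula, computed independently per key.
-- outside the precondition, e.g. on calculate_epic_as_dict(0): A returns 0, B returns 0
import Mathlib
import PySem

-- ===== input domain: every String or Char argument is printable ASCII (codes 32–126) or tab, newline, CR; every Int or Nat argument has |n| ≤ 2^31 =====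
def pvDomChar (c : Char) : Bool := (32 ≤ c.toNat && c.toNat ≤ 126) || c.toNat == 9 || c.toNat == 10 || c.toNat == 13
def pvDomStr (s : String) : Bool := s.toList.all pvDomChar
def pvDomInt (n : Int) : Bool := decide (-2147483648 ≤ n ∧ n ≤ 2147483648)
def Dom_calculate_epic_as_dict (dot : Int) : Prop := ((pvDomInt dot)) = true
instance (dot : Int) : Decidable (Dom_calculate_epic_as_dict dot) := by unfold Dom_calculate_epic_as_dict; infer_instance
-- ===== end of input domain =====

-- B replaces A's stateful loop (running accumulator + len()-based branching over a mutated dict)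
-- with a dict comprehension using a closed-form triangular-number value per key (objective: simpler).

-- ===== PORT A =====
-- Python A. On dot == 0 Python returns the int 0 (not a dict), excluded by Pre_; the port returns [] there.
-- success_list[str(n-1)] in the loop is ported as getD with default 0: on the branch where it runs
-- (size > 1) the key str(n-1) is always present, so this is exact (no KeyError is reachable).
def calculate_epic_as_dict (dot : Int) : List (String × Int) :=
  if dot == 0 then []
  else
    let number_line := PySem.List.pyRange 0 (dot + 1) 1
    (number_line.foldl
      (fun (success_list : PySem.Dict String Int) n =>
        if 1 < success_list.size then
          let epic_attr := (n - 1) + success_list.getD (PySem.Int.toStr (n - 1)) 0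
          success_list.insert (PySem.Int.toStr n) epic_attr
        else
          success_list.insert (PySem.Int.toStr n) 1)
      PySem.Dict.empty).items

-- ===== PORT B =====
-- dict comprehension over range(dot+1); keys str(n) are pairwise distinct, so it is the map in order.
def calculate_epic_as_dict_alt (dot : Int) : List (String × Int) :=
  if dot == 0 then []
  else
    (PySem.List.pyRange 0 (dot + 1) 1).map
      (fun n => (PySem.Int.toStr n, 1 + PySem.Int.floordiv (n * (n - 1)) 2))

-- ===== PRECONDITION & SPEC =====
-- Pre_ excludes only dot == 0, where Python A returns the int 0 — a value outside the declared
-- return type dict[str, int] (B returns the same 0 there).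
def Pre_calculate_epic_as_dict (dot : Int) : Prop := dot ≠ 0
instance (dot : Int) : Decidable (Pre_calculate_epic_as_dict dot) := by unfold Pre_calculate_epic_as_dict; infer_instance
def pvWitness_calculate_epic_as_dict : Int := 3

def Spec_calculate_epic_as_dict (dot : Int) (out : List (String × Int)) : Prop := out = calculate_epic_as_dict_alt dot
instance (dot : Int) (out : List (String × Int)) : Decidable (Spec_calculate_epic_as_dict dot out) := by unfold Spec_calculate_epic_as_dict; infer_instance

-- ===== CLAIM (what is proved, stated in full; the proofs are below) =====
def Claim_equal_calculate_epic_as_dict : Prop := ∀ (dot : Int), Dom_calculate_epic_as_dict dot → Pre_calculate_epic_as_dict dot → Spec_calculate_epic_as_dict dot (calculate_epic_as_dict dot)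

-- ===== LEMMAS AND PROOFS =====

-- Nat.digitChar is injective on digits below 10.
lemma pv_digitChar_inj {a b : Nat} (ha : a < 10) (hb : b < 10)
    (h : Nat.digitChar a = Nat.digitChar b) : a = b := by
  interval_cases a <;> interval_cases b <;> revert h <;> decide

lemma pv_map_digitChar_inj : ∀ {l₁ l₂ : List Nat}, (∀ x ∈ l₁, x < 10) → (∀ x ∈ l₂, x < 10) →
    l₁.map Nat.digitChar = l₂.map Nat.digitChar → l₁ = l₂ := by
  intro l₁
  induction l₁ with
  | nil => intro l₂ _ _ h; cases l₂ <;> simp_all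
  | cons a t ih =>
    intro l₂ h₁ h₂ h
    cases l₂ with
    | nil => simp_all
    | cons b t₂ =>
      simp only [List.map_cons, List.cons.injEq] at h
      have := pv_digitChar_inj (h₁ a (by simp)) (h₂ b (by simp)) h.1
      subst this
      simp only [List.cons.injEq, true_and]
      exact ih (fun x hx => h₁ x (by simp [hx])) (fun x hx => h₂ x (by simp [hx])) h.2

-- characterisation of core toDigitsCore via Nat.digits
lemma pv_toDigitsCore_eq (b : Nat) (hb : 1 < b) :
    ∀ (n : Nat), ∀ (f : Nat) (acc : List Char), n < f →
      Nat.toDigitsCore b f n acc =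
        (if n = 0 then ['0'] else ((Nat.digits b n).map Nat.digitChar).reverse) ++ acc := by
  intro n
  induction n using Nat.strong_induction_on with
  | _ n ih =>
    intro f acc hf
    match f with
    | 0 => omega
    | g + 1 =>
      simp only [Nat.toDigitsCore]
      by_cases h0 : n / b = 0
      · have hnb : n < b := (Nat.div_eq_zero_iff_lt (by omega)).mp h0
        simp only [h0]
        by_cases hn : n = 0
        · subst hn; simp [Nat.digitChar]
        · rw [if_neg hn, Nat.digits_def' hb (Nat.pos_of_ne_zero hn), h0]
          simp [Nat.mod_eq_of_lt hnb]
      · have hnz : n ≠ 0 := by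
          intro h; subst h; simp at h0
        have hdiv_lt : n / b < n := Nat.div_lt_self (Nat.pos_of_ne_zero hnz) hb
        rw [if_neg h0]
        rw [ih (n / b) hdiv_lt g (Nat.digitChar (n % b) :: acc) (by omega)]
        rw [if_neg h0, if_neg hnz]
        rw [Nat.digits_def' hb (Nat.pos_of_ne_zero hnz)]
        simp

lemma pv_toDigits_inj {n m : Nat} (h : Nat.toDigits 10 n = Nat.toDigits 10 m) : n = m := by
  have hc : ∀ k : Nat, Nat.toDigits 10 k =
      (if k = 0 then ['0'] else ((Nat.digits 10 k).map Nat.digitChar).reverse) := by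
    intro k
    have := pv_toDigitsCore_eq 10 (by omega) k (k + 1) [] (by omega)
    simpa [Nat.toDigits] using this
  rw [hc, hc] at h
  have hlt : ∀ k : Nat, ∀ x ∈ Nat.digits 10 k, x < 10 := fun k x hx =>
    Nat.digits_lt_base (by omega) hx
  have hlast : ∀ k : Nat, k ≠ 0 → (Nat.digits 10 k).map Nat.digitChar ≠ [Nat.digitChar 0] := by
    intro k hk hcontra
    have h1 : Nat.digits 10 k = [0] := by
      have hc2 : (Nat.digits 10 k).map Nat.digitChar = List.map Nat.digitChar [0] := by
        simpa using hcontra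
      simpa using pv_map_digitChar_inj (hlt k) (by simp) hc2
    have := Nat.getLast_digit_ne_zero 10 hk
    simp [h1] at this
  by_cases hn : n = 0 <;> by_cases hm : m = 0
  · omega
  · exfalso
    rw [if_pos hn, if_neg hm] at h
    apply hlast m hm
    have h2 : ((Nat.digits 10 m).map Nat.digitChar).reverse = ['0'] := h.symm
    rw [List.reverse_eq_iff] at h2
    simpa [Nat.digitChar] using h2
  · exfalso
    rw [if_neg hn, if_pos hm] at h
    apply hlast n hn
    rw [List.reverse_eq_iff] at h
    simpa [Nat.digitChar] using h
  · rw [if_neg hn, if_neg hm] at h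
    have := List.reverse_injective h
    have := pv_map_digitChar_inj (hlt n) (hlt m) this
    exact Nat.digits_inj_iff.mp this

-- str(i) is injective on nonnegative ints
lemma pv_toStr_inj_nonneg {i j : Int} (hi : 0 ≤ i) (hj : 0 ≤ j)
    (h : PySem.Int.toStr i = PySem.Int.toStr j) : i = j := by
  unfold PySem.Int.toStr PySem.Int.toChars at h
  rw [if_neg (by omega), if_neg (by omega)] at h
  have := String.ofList_inj.mp h
  have := pv_toDigits_inj this
  omega

-- the closed-form pair B builds for n
def pvF (n : Int) : String × Int := (PySem.Int.toStr n, 1 + PySem.Int.floordiv (n * (n - 1)) 2)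

lemma pv_keys_nodup (m : Nat) :
    ((PySem.List.pyRange 0 ((m : Int) + 1) 1).map pvF).map Prod.fst |>.Nodup := by
  rw [List.map_map]
  apply List.Nodup.map_on
  · intro x hx y hy hxy
    have hx' := (PySem.List.mem_pyRange_one.mp hx).1
    have hy' := (PySem.List.mem_pyRange_one.mp hy).1
    exact pv_toStr_inj_nonneg hx' hy' hxy
  · exact PySem.List.nodup_pyRange_one 0 ((m : Int) + 1)

-- triangular-number step
lemma pv_arith (m : Nat) :
    (((m : Int) + 1) - 1) + (1 + PySem.Int.floordiv ((m : Int) * ((m : Int) - 1)) 2)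
      = 1 + PySem.Int.floordiv (((m : Int) + 1) * (((m : Int) + 1) - 1)) 2 := by
  rw [PySem.Int.floordiv_eq_ediv_of_pos (by omega), PySem.Int.floordiv_eq_ediv_of_pos (by omega)]
  have h : ((m : Int) + 1) * (((m : Int) + 1) - 1) = (m : Int) * ((m : Int) - 1) + (m : Int) * 2 := by
    ring
  rw [h, Int.add_mul_ediv_right _ _ (by omega : (2:Int) ≠ 0)]
  omega

-- the loop invariant: after the first m+1 iterations the dict is exactly B's list of pairs
lemma pv_fold_eq (m : Nat) :
    ((PySem.List.pyRange 0 ((m : Int) + 1) 1).foldl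
      (fun (success_list : PySem.Dict String Int) n =>
        if 1 < success_list.size then
          let epic_attr := (n - 1) + success_list.getD (PySem.Int.toStr (n - 1)) 0
          success_list.insert (PySem.Int.toStr n) epic_attr
        else
          success_list.insert (PySem.Int.toStr n) 1)
      PySem.Dict.empty)
    = PySem.Dict.mk ((PySem.List.pyRange 0 ((m : Int) + 1) 1).map pvF) := by
  induction m with
  | zero => decide
  | succ m ih =>
    have hsplit : PySem.List.pyRange 0 ((m + 1 : Nat) : Int) 1 ++ [((m + 1 : Nat) : Int)]
        = PySem.List.pyRange 0 (((m + 1 : Nat) : Int) + 1) 1 :=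
      (PySem.List.pyRange_one_succ_right (by positivity)).symm
    push_cast at hsplit ⊢
    rw [← hsplit, List.foldl_append, List.map_append, ih]
    -- one more step of the loop
    have hsize : (PySem.Dict.mk ((PySem.List.pyRange 0 ((m : Int) + 1) 1).map pvF)).size = m + 1 := by
      simp [PySem.Dict.size, PySem.List.length_pyRange_one]
    match m with
    | 0 => decide
    | Nat.succ k =>
      rw [List.foldl_cons, List.foldl_nil]
      rw [if_pos (by rw [hsize]; omega)]
      have hmem : pvF ((k : Int) + 1) ∈ (PySem.List.pyRange 0 (((k : Int) + 1) + 1) 1).map pvF := by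
        apply List.mem_map_of_mem
        rw [PySem.List.mem_pyRange_one]
        constructor <;> omega
      have hnodup := pv_keys_nodup (k + 1)
      push_cast at hnodup hmem ⊢
      have hget : (PySem.Dict.mk ((PySem.List.pyRange 0 ((k : Int) + 1 + 1) 1).map pvF)).getD
          (PySem.Int.toStr ((k : Int) + 1 + 1 - 1)) 0
          = 1 + PySem.Int.floordiv (((k : Int) + 1) * (((k : Int) + 1) - 1)) 2 := by
        have h1 : ((k : Int) + 1 + 1 - 1) = (k : Int) + 1 := by ring
        rw [h1]
        exact PySem.Dict.getD_of_mem_items _ hmem hnodup 0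
      rw [hget]
      have hfresh : (PySem.Dict.mk ((PySem.List.pyRange 0 ((k : Int) + 1 + 1) 1).map pvF)).contains
          (PySem.Int.toStr ((k : Int) + 1 + 1)) = false := by
        rw [← Bool.not_eq_true, PySem.Dict.contains_iff_mem_keys]
        intro hmemk
        simp only [PySem.Dict.keys, List.map_map, List.mem_map] at hmemk
        obtain ⟨x, hx, hxeq⟩ := hmemk
        have hx' := PySem.List.mem_pyRange_one.mp hx
        have := pv_toStr_inj_nonneg hx'.1 (by omega) hxeq
        omega
      apply PySem.Dict.ext
      rw [PySem.Dict.items_insert_of_not_contains _ _ hfresh]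
      congr 1
      have harith := pv_arith (k + 1)
      push_cast at harith
      rw [List.map_cons, List.map_nil]
      simp only [pvF]
      rw [harith]

-- ===== VERDICT (by name: the statement is the Claim_ definition above) =====
theorem calculate_epic_as_dict_spec : Claim_equal_calculate_epic_as_dict := by
  intro dot _ hpre
  unfold Spec_calculate_epic_as_dict calculate_epic_as_dict calculate_epic_as_dict_alt
  rw [if_neg (by simpa using hpre), if_neg (by simpa using hpre)]
  rcases lt_or_gt_of_ne hpre with hneg | hpos
  · rw [PySem.List.pyRange_one_eq_nil (by omega)]
    simp only [List.foldl_nil, List.map_nil]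
    rfl
  · obtain ⟨m, rfl⟩ : ∃ m : Nat, dot = (m : Int) := ⟨dot.toNat, by omega⟩
    simp only [pv_fold_eq m]
    rfl
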